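-- pv_equiv track=rewrite | github.com/Giang11221842/Data-LakeHouse- | etls/silver_transform.py | _build_bronze_records_by_service
-- ===== SOURCE A (Python) =====
-- from typing import Any, Dict, List, Optional, Tuple
--
-- def _build_bronze_records_by_service(
--     bronze_logs: List[Dict[str, Any]],
-- ) -> Dict[str, List[Dict[str, Any]]]:
--     records: Dict[str, List[Dict[str, Any]]] = {}
--     for log in bronze_logs:
--         service = str(log["service_type"]).lower()
--         records.setdefault(service, []).append(log)
--     return records
-- ===== SOURCE B (Python) =====
-- from typing import Any, Dict, List
--
-- def _build_bronze_records_by_service(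
--     bronze_logs: List[Dict[str, Any]],
-- ) -> Dict[str, List[Dict[str, Any]]]:
--     # Pass 1: distinct service keys in first-occurrence order.
--     keys: List[str] = []
--     for log in bronze_logs:
--         k = str(log["service_type"]).lower()
--         if k not in keys:
--             keys.append(k)
--     # Pass 2: one filter per key.
--     return {k: [log for log in bronze_logs
--                 if str(log["service_type"]).lower() == k]
--             for k in keys}
-- ===== Notes on version B (the rewrite author's own statement) =====
-- stated objective: alternative
-- what changed: Replaces the single setdefault-and-append accumulation pass with a two-pass scheme: first collect the distinct lowercased service keys in first-occurrence order, then build each group with a separate filter over the input.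
import Mathlib
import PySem

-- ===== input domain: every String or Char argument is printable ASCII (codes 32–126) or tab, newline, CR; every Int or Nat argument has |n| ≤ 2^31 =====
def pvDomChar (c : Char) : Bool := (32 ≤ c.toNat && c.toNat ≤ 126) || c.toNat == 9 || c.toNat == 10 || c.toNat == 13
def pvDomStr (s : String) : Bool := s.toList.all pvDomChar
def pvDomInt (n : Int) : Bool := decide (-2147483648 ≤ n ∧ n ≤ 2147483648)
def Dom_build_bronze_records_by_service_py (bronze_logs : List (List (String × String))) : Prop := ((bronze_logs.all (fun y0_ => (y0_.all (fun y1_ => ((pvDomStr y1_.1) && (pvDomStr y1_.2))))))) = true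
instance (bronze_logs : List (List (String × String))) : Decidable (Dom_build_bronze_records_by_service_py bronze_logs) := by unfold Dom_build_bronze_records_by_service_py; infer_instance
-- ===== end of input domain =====

-- B replaces A's single setdefault/append accumulation pass by a two-pass scheme
-- (distinct keys in first-occurrence order, then one filter per key); same result, similar cost.


-- ===== PORT A =====
-- shared key helper: str(log["service_type"]).lower()  (the .getD "" is never hit inside Pre_)
def pvKey (log : List (String × String)) : String :=
  PySem.Str.lower (((PySem.Dict.mk log).get? "service_type").getD "")

def build_bronze_records_by_service_py (bronze_logs : List (List (String × String))) : List (String × List (List (String × String))) :=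
  (bronze_logs.foldl
    (fun records log => records.modify (pvKey log) [] (· ++ [log]))
    (PySem.Dict.empty : PySem.Dict String (List (List (String × String))))).items

-- ===== PORT B =====
def build_bronze_records_by_service_py_alt (bronze_logs : List (List (String × String))) : List (String × List (List (String × String))) :=
  let keys : PySem.Set String := bronze_logs.foldl (fun ks log => PySem.Set.add ks (pvKey log)) []
  keys.map (fun k => (k, bronze_logs.filter (fun log => pvKey log == k)))

-- ===== PRECONDITION & SPEC =====
-- Pre_ excludes exactly the logs without a "service_type" key, where the Python A raises KeyError (B does too).
def Pre_build_bronze_records_by_service_py (bronze_logs : List (List (String × String))) : Prop :=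
  ∀ log ∈ bronze_logs, (PySem.Dict.mk log).contains "service_type" = true
instance (bronze_logs : List (List (String × String))) : Decidable (Pre_build_bronze_records_by_service_py bronze_logs) := by unfold Pre_build_bronze_records_by_service_py; infer_instance

def pvWitness_build_bronze_records_by_service_py : (List (List (String × String))) :=
  [[("service_type", "API"), ("msg", "ok")], [("service_type", "api")], [("service_type", "Db")]]

def Spec_build_bronze_records_by_service_py (bronze_logs : List (List (String × String))) (out : List (String × List (List (String × String)))) : Prop := out = build_bronze_records_by_service_py_alt bronze_logs
instance (bronze_logs : List (List (String × String))) (out : List (String × List (List (String × String)))) : Decidable (Spec_build_bronze_records_by_service_py bronze_logs out) := by unfold Spec_build_bronze_records_by_service_py; infer_instance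

-- ===== CLAIM (what is proved, stated in full; the proofs are below) =====
def Claim_equal_build_bronze_records_by_service_py : Prop := ∀ (bronze_logs : List (List (String × String))), Dom_build_bronze_records_by_service_py bronze_logs → Pre_build_bronze_records_by_service_py bronze_logs → Spec_build_bronze_records_by_service_py bronze_logs (build_bronze_records_by_service_py bronze_logs)

-- ===== LEMMAS AND PROOFS =====

-- A's accumulating fold, rewritten over the (key, log) pairs so the PySem grouping lemmas apply.
theorem pvFoldA_eq (bronze_logs : List (List (String × String))) :
    bronze_logs.foldl
      (fun records log => records.modify (pvKey log) [] (· ++ [log]))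
      (PySem.Dict.empty : PySem.Dict String (List (List (String × String))))
    = (bronze_logs.map (fun log => (pvKey log, log))).foldl
        (fun records p => records.modify p.1 [] (· ++ [p.2])) PySem.Dict.empty := by
  rw [List.foldl_map]

theorem pvKeysA (bronze_logs : List (List (String × String))) :
    (bronze_logs.foldl
      (fun records log => records.modify (pvKey log) [] (· ++ [log]))
      (PySem.Dict.empty : PySem.Dict String (List (List (String × String))))).keys
    = PySem.Set.ofList (bronze_logs.map pvKey) := by
  rw [PySem.Dict.keys_foldl_modify_key, PySem.Dict.keys_empty, PySem.Set.update_nil_left]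

-- ===== VERDICT (by name: the statement is the Claim_ definition above) =====
theorem build_bronze_records_by_service_py_spec : Claim_equal_build_bronze_records_by_service_py := by
  intro bronze_logs _ _
  unfold Spec_build_bronze_records_by_service_py
  unfold build_bronze_records_by_service_py build_bronze_records_by_service_py_alt
  rw [PySem.Set.update_map_eq_foldl_add (s := []) (l := bronze_logs) (f := pvKey) |>.symm]
  rw [PySem.Set.update_nil_left]
  rw [PySem.Dict.items_eq_map_keys _ (by
        exact PySem.Dict.nodup_keys_foldl_modify_key bronze_logs pvKey []
          (fun d log => (· ++ [log])) _ PySem.Dict.nodup_keys_empty) []]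
  rw [pvKeysA]
  apply List.map_congr_left
  intro k _
  congr 1
  rw [pvFoldA_eq, PySem.Dict.getD_foldl_modify_append, PySem.Dict.getD_empty]
  simp [List.filter_map, Function.comp_def]
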